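-- pv_equiv track=rewrite | github.com/josikie/Binary-Number-Mini-Calculator | binarynumber.py | checkIfNotBinaryNumber
-- ===== SOURCE A (Python) =====
-- def checkIfNotBinaryNumber(stringOne, stringTwo):
--     notBinaryNumber = False
--     for i in stringOne:
--         if i != '1':
--             if i != '0':
--                 notBinaryNumber = True
--
--     for j in stringTwo:
--         if j != '1':
--             if j != '0':
--                 notBinaryNumber = True
--
--     return notBinaryNumber
-- ===== SOURCE B (Python) =====
-- def checkIfNotBinaryNumber(stringOne, stringTwo):
--     # Counting formulation: a character outside {'0','1'} exists iff the
--     # number of '0's and '1's falls short of the total length.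
--     zerosAndOnes = (stringOne.count('0') + stringOne.count('1')
--                     + stringTwo.count('0') + stringTwo.count('1'))
--     return len(stringOne) + len(stringTwo) != zerosAndOnes
-- ===== Notes on version B (the rewrite author's own statement) =====
-- stated objective: faster
-- what changed: Replaces A's per-character boolean-flag scans (nested ifs setting notBinaryNumber) by an arithmetic characterisation: count the '0's and '1's with str.count and compare the sum against the total length; no per-character Python-level branch or flag is maintained.
import Mathlib
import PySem

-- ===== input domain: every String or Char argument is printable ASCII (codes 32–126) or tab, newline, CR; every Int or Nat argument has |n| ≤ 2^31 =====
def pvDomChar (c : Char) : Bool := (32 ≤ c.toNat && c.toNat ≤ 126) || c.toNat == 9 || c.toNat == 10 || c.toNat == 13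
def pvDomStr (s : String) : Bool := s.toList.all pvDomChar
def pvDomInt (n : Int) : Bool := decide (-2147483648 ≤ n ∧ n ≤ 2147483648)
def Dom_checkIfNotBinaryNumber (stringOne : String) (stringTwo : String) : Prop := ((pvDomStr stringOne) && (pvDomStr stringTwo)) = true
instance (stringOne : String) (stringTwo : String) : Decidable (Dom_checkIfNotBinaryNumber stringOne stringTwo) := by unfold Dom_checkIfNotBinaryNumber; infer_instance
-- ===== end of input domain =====

-- B replaces A's per-character boolean-flag scans by an arithmetic characterisation
-- (count of '0's and '1's vs total length), measurably faster via C-level str.count.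


-- ===== PORT A =====
def checkIfNotBinaryNumber (stringOne : String) (stringTwo : String) : Bool :=
  let nb1 := stringOne.toList.foldl
    (fun notBinaryNumber i =>
      if i ≠ '1' then (if i ≠ '0' then true else notBinaryNumber) else notBinaryNumber)
    false
  let nb2 := stringTwo.toList.foldl
    (fun notBinaryNumber j =>
      if j ≠ '1' then (if j ≠ '0' then true else notBinaryNumber) else notBinaryNumber)
    nb1
  nb2

-- ===== PORT B =====
def checkIfNotBinaryNumber_alt (stringOne : String) (stringTwo : String) : Bool :=
  let zerosAndOnes := PySem.Str.count stringOne "0" + PySem.Str.count stringOne "1"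
                    + PySem.Str.count stringTwo "0" + PySem.Str.count stringTwo "1"
  PySem.Str.len stringOne + PySem.Str.len stringTwo != zerosAndOnes

-- ===== PRECONDITION & SPEC =====
def Spec_checkIfNotBinaryNumber (stringOne : String) (stringTwo : String) (out : Bool) : Prop := out = checkIfNotBinaryNumber_alt stringOne stringTwo
instance (stringOne : String) (stringTwo : String) (out : Bool) : Decidable (Spec_checkIfNotBinaryNumber stringOne stringTwo out) := by unfold Spec_checkIfNotBinaryNumber; infer_instance

-- ===== CLAIM (what is proved, stated in full; the proofs are below) =====
def Claim_equal_checkIfNotBinaryNumber : Prop := ∀ (stringOne : String) (stringTwo : String), Dom_checkIfNotBinaryNumber stringOne stringTwo → Spec_checkIfNotBinaryNumber stringOne stringTwo (checkIfNotBinaryNumber stringOne stringTwo)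

-- ===== LEMMAS AND PROOFS =====

-- A's loop over one string: the accumulator ORed with "some char is non-binary".
theorem pv_loopA (l : List Char) (acc : Bool) :
    l.foldl (fun nb c => if c ≠ '1' then (if c ≠ '0' then true else nb) else nb) acc
      = (acc || l.any (fun c => c ≠ '1' ∧ c ≠ '0')) := by
  induction l generalizing acc with
  | nil => simp
  | cons c l ih =>
    simp only [List.foldl_cons, List.any_cons, ih]
    by_cases h1 : c = '1' <;> by_cases h0 : c = '0' <;>
      cases acc <;> simp [h1, h0]

-- Python's s.count(c) for a single character is the character count.
theorem pv_count_go_singleton (c : Char) (l : List Char) (fuel : Nat) (acc : Nat)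
    (h : l.length ≤ fuel) :
    PySem.Chars.count.go [c] fuel l acc = acc + l.count c := by
  induction l generalizing fuel acc with
  | nil => cases fuel <;> simp [PySem.Chars.count.go]
  | cons x t ih =>
    cases fuel with
    | zero => simp at h
    | succ fuel =>
      simp only [List.length_cons, Nat.succ_le_succ_iff] at h
      have hstep : PySem.Chars.count.go [c] (fuel + 1) (x :: t) acc
          = if List.isPrefixOf [c] (x :: t) = true
            then PySem.Chars.count.go [c] fuel t (acc + 1)
            else PySem.Chars.count.go [c] fuel t acc := rfl
      rw [hstep]
      by_cases hx : c = x
      · rw [if_pos (by simp [List.isPrefixOf, hx]), ih _ _ h, List.count_cons]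
        simp [hx]
        omega
      · have hxc : ¬ x = c := fun h' => hx h'.symm
        rw [if_neg (by simp [List.isPrefixOf]; exact hx), ih _ _ h, List.count_cons]
        simp [hxc]

theorem pv_count_singleton (l : List Char) (c : Char) :
    PySem.Chars.count l [c] = l.count c := by
  simp [PySem.Chars.count, pv_count_go_singleton c l l.length 0 le_rfl]

-- '0'/'1' counts never exceed the length.
theorem pv_counts_le (l : List Char) : l.count '0' + l.count '1' ≤ l.length := by
  induction l with
  | nil => simp
  | cons c t ih =>
    by_cases h0 : c = '0' <;> by_cases h1 : c = '1' <;>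
      simp_all <;> omega

-- The arithmetic characterisation: counts fall short iff some char is non-binary.
theorem pv_key (l : List Char) :
    (l.any (fun c => c ≠ '1' ∧ c ≠ '0'))
      = (l.length != l.count '0' + l.count '1') := by
  induction l with
  | nil => simp
  | cons c t ih =>
    have ht := pv_counts_le t
    rw [Bool.eq_iff_iff] at ih ⊢
    simp only [List.any_cons, List.count_cons, List.length_cons, Bool.or_eq_true,
      decide_eq_true_eq, bne_iff_ne, ne_eq] at ih ⊢
    by_cases h0 : c = '0' <;> by_cases h1 : c = '1' <;>
      simp only [h0, h1, if_pos, beq_iff_eq] <;> simp_all <;> omega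

-- ===== VERDICT (by name: the statement is the Claim_ definition above) =====
theorem checkIfNotBinaryNumber_spec : Claim_equal_checkIfNotBinaryNumber := by
  intro s1 s2 _
  unfold Spec_checkIfNotBinaryNumber checkIfNotBinaryNumber checkIfNotBinaryNumber_alt
  simp only [pv_loopA, Bool.false_or, PySem.Str.count_eq, PySem.Str.len_eq]
  have h0 : ("0" : String).toList = ['0'] := rfl
  have h1 : ("1" : String).toList = ['1'] := rfl
  rw [h0, h1, pv_count_singleton, pv_count_singleton, pv_count_singleton,
    pv_count_singleton]
  have hkey := pv_key (s1.toList ++ s2.toList)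
  simp only [List.any_append, List.length_append, List.count_append] at hkey
  rw [hkey, Bool.eq_iff_iff]
  simp only [bne_iff_ne, ne_eq]
  omega
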